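-- pv_equiv track=rewrite | github.com/jrbackon/python | spf_editor.py | network_replace
-- ===== SOURCE A (Python) =====
-- def network_replace(string_list, networks):
--     formatted_list = []
--     for index, address in enumerate(string_list):
--         for network in networks:
--             if network.split("/", 1)[0] == address:
--                 string_list[index] = network
--                 break
--             else:
--                 pass
--         if ":" in string_list[index]:
--             formatted_list.append("ip6:"+string_list[index])
--         else:
--             formatted_list.append("ip4:"+string_list[index])
--     return formatted_list
-- ===== SOURCE B (Python) =====
-- def network_replace(string_list, networks):
--     # Transposed traversal: iterate NETWORKS outermost, substituting all still-pending
--     # addresses that equal the network's prefix (first network wins because a matched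
--     # index leaves the pending set); then a final formatting pass.
--     # Mutates string_list in place exactly like A.
--     pending = list(range(len(string_list)))
--     for network in networks:
--         prefix = network.split("/", 1)[0]
--         still = []
--         for i in pending:
--             if string_list[i] == prefix:
--                 string_list[i] = network
--             else:
--                 still.append(i)
--         pending = still
--     return [("ip6:" if ":" in s else "ip4:") + s for s in string_list]
-- ===== Notes on version B (the rewrite author's own statement) =====
-- stated objective: alternative
-- what changed: Transposes the loop nest: instead of A's per-address scan over networks with break, B iterates networks outermost over a shrinking pending-index set (a matched index leaves the set, giving first-network-wins), then formats in a separate pass.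
import Mathlib
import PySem

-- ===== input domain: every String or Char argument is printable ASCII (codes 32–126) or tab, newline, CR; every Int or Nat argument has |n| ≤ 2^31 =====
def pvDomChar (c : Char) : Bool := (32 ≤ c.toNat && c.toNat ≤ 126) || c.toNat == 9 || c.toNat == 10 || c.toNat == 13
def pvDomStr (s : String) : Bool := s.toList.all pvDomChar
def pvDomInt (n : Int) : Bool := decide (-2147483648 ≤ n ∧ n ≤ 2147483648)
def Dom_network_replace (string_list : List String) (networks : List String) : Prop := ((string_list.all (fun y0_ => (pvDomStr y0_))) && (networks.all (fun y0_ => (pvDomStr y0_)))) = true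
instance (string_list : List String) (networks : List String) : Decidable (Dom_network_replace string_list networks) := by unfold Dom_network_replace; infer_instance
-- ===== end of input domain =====

-- B transposes A's loop nest (networks outermost over a shrinking pending-index set, then a
-- formatting pass) instead of A's per-address inner scan with break; both mutate string_list
-- in place identically, the equivalence proved here is about the return value.


-- shared helper: network.split("/", 1)[0]  (split is never empty, so [0] never raises)
def pvPrefix (network : String) : String :=
  match PySem.Str.splitMax? network "/" 1 with
  | some (p :: _) => p
  | _ => ""   -- unreachable: sep ≠ "" and split is nonempty

-- ===== PORT A =====
-- inner 'for network in networks: if …: …; break'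
def pvFindNetA (address : String) (networks : List String) : Option String :=
  match networks with
  | [] => none
  | n :: rest => if pvPrefix n == address then some n else pvFindNetA address rest

-- outer loop: state = (current string_list, formatted_list), index i
def pvLoopA (networks : List String) (lst : List String) (fmt : List String) (i : Nat) :
    List String :=
  match h : lst[i]? with
  | none => fmt
  | some address =>
    let lst' := match pvFindNetA address networks with
                | some n => lst.set i n
                | none => lst
    let cur := lst'[i]?.getD ""
    let fmt' := if PySem.Str.isIn ":" cur then fmt ++ ["ip6:" ++ cur] else fmt ++ ["ip4:" ++ cur]
    pvLoopA networks lst' fmt' (i + 1)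
  termination_by lst.length - i
  decreasing_by
    obtain ⟨hi, -⟩ := List.getElem?_eq_some_iff.mp h
    cases pvFindNetA address networks <;> simp <;> omega

def network_replace (string_list : List String) (networks : List String) : List String :=
  pvLoopA networks string_list [] 0

-- ===== PORT B =====
-- inner loop body: 'for i in pending: if string_list[i] == prefix: … else: still.append(i)'
def pvStepI (pre net : String) (t : List String × List Nat) (i : Nat) : List String × List Nat :=
  if t.1[i]?.getD "" == pre then (t.1.set i net, t.2) else (t.1, t.2 ++ [i])

-- one outer iteration: process one network over the pending indices
def pvStepN (st : List String × List Nat) (network : String) : List String × List Nat :=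
  st.2.foldl (pvStepI (pvPrefix network) network) (st.1, [])

def network_replace_alt (string_list : List String) (networks : List String) : List String :=
  (networks.foldl pvStepN (string_list, List.range string_list.length)).1.map
    (fun s => (if PySem.Str.isIn ":" s then "ip6:" else "ip4:") ++ s)

-- ===== PRECONDITION & SPEC =====
def Spec_network_replace (string_list : List String) (networks : List String) (out : List String) : Prop := out = network_replace_alt string_list networks
instance (string_list : List String) (networks : List String) (out : List String) : Decidable (Spec_network_replace string_list networks out) := by unfold Spec_network_replace; infer_instance

-- ===== CLAIM (what is proved, stated in full; the proofs are below) =====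
def Claim_equal_network_replace : Prop := ∀ (string_list : List String) (networks : List String), Dom_network_replace string_list networks → Spec_network_replace string_list networks (network_replace string_list networks)

-- ===== LEMMAS AND PROOFS =====

-- the per-element function both programs compute
def pvF (networks : List String) (s : String) : String :=
  let r := (pvFindNetA s networks).getD s
  (if PySem.Str.isIn ":" r then "ip6:" else "ip4:") ++ r

lemma pvLoopA_spec (networks : List String) (lst : List String) (fmt : List String) (i : Nat) :
    pvLoopA networks lst fmt i = fmt ++ (lst.drop i).map (pvF networks) := by
  rw [pvLoopA.eq_def]
  split
  · next h =>
    have hle : lst.length ≤ i := List.getElem?_eq_none_iff.mp h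
    rw [List.drop_eq_nil_of_le hle]; simp
  · next address h =>
    obtain ⟨hi, haddr⟩ := List.getElem?_eq_some_iff.mp h
    have hd : lst.drop i = address :: lst.drop (i+1) := by
      rw [List.drop_eq_getElem_cons hi, haddr]
    cases hfind : pvFindNetA address networks with
    | none =>
      rw [pvLoopA_spec networks lst _ (i+1), h, hd]
      simp only [Option.getD_some, List.map_cons, pvF, hfind]
      by_cases hc : PySem.Chars.isIn [':'] address.toList = true <;> simp [hc]
    | some n =>
      have hcur : (lst.set i n)[i]?.getD "" = n := by simp [hi]
      rw [pvLoopA_spec networks (lst.set i n) _ (i+1), hcur,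
          List.drop_set_of_lt (by omega), hd]
      simp only [List.map_cons, pvF, hfind]
      by_cases hc : PySem.Chars.isIn [':'] n.toList = true <;> simp [hc]

-- inner loop of B: pointwise effect on the list, and the surviving pending indices
lemma pvInner_spec (pre net : String) (pending : List Nat) (lst : List String) (acc : List Nat)
    (hnd : pending.Nodup) (hlt : ∀ i ∈ pending, i < lst.length) :
    (pending.foldl (pvStepI pre net) (lst, acc)).1.length = lst.length ∧
    (∀ j, (pending.foldl (pvStepI pre net) (lst, acc)).1[j]? =
      if j ∈ pending ∧ lst[j]?.getD "" = pre then some net else lst[j]?) ∧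
    (pending.foldl (pvStepI pre net) (lst, acc)).2 =
      acc ++ pending.filter (fun i => ¬ (lst[i]?.getD "" == pre)) := by
  induction pending generalizing lst acc with
  | nil => simp
  | cons i rest ih =>
    obtain ⟨hirest, hndr⟩ := List.nodup_cons.mp hnd
    have hilt : i < lst.length := hlt i (by simp)
    simp only [List.foldl_cons, pvStepI]
    by_cases h : lst[i]?.getD "" == pre
    · rw [if_pos h]
      have hlt' : ∀ k ∈ rest, k < (lst.set i net).length := by
        intro k hk; simpa using hlt k (by simp [hk])
      obtain ⟨h1, h2, h3⟩ := ih (lst.set i net) acc hndr hlt'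
      refine ⟨by simpa using h1, ?_, ?_⟩
      · intro j
        rw [h2 j]
        by_cases hji : j = i
        · subst hji
          have hjr : j ∉ rest := hirest
          have hval : lst[j] = pre := by
            have h' := eq_of_beq h
            rwa [List.getElem?_eq_getElem hilt, Option.getD_some] at h'
          simp [hjr, hilt, hval]
        · have hne : (lst.set i net)[j]? = lst[j]? := by
            rw [List.getElem?_set_ne (by omega)]
          rw [hne]
          by_cases hm : j ∈ rest <;> simp [hm, hji]
      · rw [h3, List.filter_cons]
        simp only [h, not_true_eq_false, decide_false, Bool.false_eq_true, if_false]
        congr 1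
        apply List.filter_congr
        intro k hk
        have : k ≠ i := fun hh => hirest (hh ▸ hk)
        rw [List.getElem?_set_ne (by omega)]
    · rw [if_neg h]
      obtain ⟨h1, h2, h3⟩ := ih lst (acc ++ [i]) hndr (fun k hk => hlt k (by simp [hk]))
      refine ⟨h1, ?_, ?_⟩
      · intro j
        rw [h2 j]
        by_cases hji : j = i
        · subst hji
          have : ¬ lst[j]?.getD "" = pre := by simpa using h
          simp [this]
        · by_cases hm : j ∈ rest <;> simp [hm, hji]
      · rw [h3, List.filter_cons]
        simp [h]

-- outer loop of B: each still-pending element ends as its first matching network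
lemma pvOuter_spec (ns : List String) (lst : List String) (pending : List Nat)
    (hnd : pending.Nodup) (hlt : ∀ i ∈ pending, i < lst.length) :
    (ns.foldl pvStepN (lst, pending)).1.length = lst.length ∧
    ∀ j, (ns.foldl pvStepN (lst, pending)).1[j]? =
      if j ∈ pending then lst[j]?.map (fun s => (pvFindNetA s ns).getD s) else lst[j]? := by
  induction ns generalizing lst pending with
  | nil =>
    refine ⟨rfl, fun j => ?_⟩
    by_cases hm : j ∈ pending <;> simp [hm, pvFindNetA]
  | cons n rest ih =>
    simp only [List.foldl_cons]
    have hstep : pvStepN (lst, pending) n =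
        (pending.foldl (pvStepI (pvPrefix n) n) (lst, [])) := rfl
    obtain ⟨h1, h2, h3⟩ := pvInner_spec (pvPrefix n) n pending lst [] hnd hlt
    set st := pending.foldl (pvStepI (pvPrefix n) n) (lst, []) with hst
    have hnd' : st.2.Nodup := by rw [h3]; simpa using hnd.filter _
    have hlt' : ∀ i ∈ st.2, i < st.1.length := by
      intro i hi
      rw [h3] at hi; simp at hi
      rw [h1]; exact hlt i hi.1
    obtain ⟨g1, g2⟩ := ih st.1 st.2 hnd' hlt'
    have heta : (st.1, st.2) = st := rfl
    rw [heta] at g1 g2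
    rw [hstep]
    refine ⟨by rw [g1, h1], fun j => ?_⟩
    rw [g2 j, h2 j]
    by_cases hp : j ∈ pending
    · have hjlt : j < lst.length := hlt j hp
      have hjget : lst[j]? = some lst[j] := List.getElem?_eq_getElem hjlt
      by_cases hmatch : lst[j]?.getD "" = pvPrefix n
      · have hjn : j ∉ st.2 := by rw [h3]; simp [hmatch]
        have hval : lst[j] = pvPrefix n := by rw [hjget] at hmatch; simpa using hmatch
        simp [hjn, hp, hjget, pvFindNetA, hval]
      · have hjy : j ∈ st.2 := by rw [h3]; simp [hp, hmatch]
        have hval : ¬ lst[j] = pvPrefix n := by rw [hjget] at hmatch; simpa using hmatch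
        have hne : ¬ pvPrefix n = lst[j] := fun hh => hval (Eq.symm hh)
        simp [hjy, hp, hjget, pvFindNetA, hval, hne]
    · have hjn : j ∉ st.2 := by rw [h3]; simp [hp]
      simp [hjn, hp]

-- ===== VERDICT (by name: the statement is the Claim_ definition above) =====
theorem network_replace_spec : Claim_equal_network_replace := by
  intro string_list networks _
  unfold Spec_network_replace network_replace network_replace_alt
  rw [pvLoopA_spec]
  obtain ⟨h1, h2⟩ := pvOuter_spec networks string_list (List.range string_list.length)
    (List.nodup_range) (by simp)
  have hfin : (networks.foldl pvStepN (string_list, List.range string_list.length)).1 =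
      string_list.map (fun s => (pvFindNetA s networks).getD s) := by
    apply List.ext_getElem?
    intro j
    rw [h2 j]
    by_cases hj : j < string_list.length
    · simp [hj]
    · simp at hj
      rw [if_neg (by simp; omega)]
      rw [List.getElem?_eq_none (by simpa using hj), List.getElem?_eq_none (by simp; omega)]
  rw [hfin]
  simp only [List.drop_zero, List.nil_append, List.map_map]
  apply List.map_congr_left
  intro s _
  simp [pvF, Function.comp]
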